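-- pv_equiv track=rewrite | github.com/pdelfino/crypto | A2-RSA/letter-to-num.py | char_to_num
-- ===== SOURCE A (Python) =====
-- dict = {"a":10,"b":11,"c":12,"d":13,"e":14,"f":15,
--         "g":16,"h":17,"i":18,"j":19,"k":20,"l":21,
--         "m":22,"n":23,"o":24,"p":25,"q":26,
--         "r":27,"s":28,"t":29,"u":30,"v":31,"w":32,"x":33,"y":34,"z":35," ":36}
--
-- def char_to_num(string):
--
--     string = string.lower()
--
--     lista_num = []
--
--     for char in string:
--         #print (char)
--         for i in dict:
--             #print (i)
--             if char==i:
--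
--                 lista_num.append(dict[i])
--                 break
--     string = ""
--     for i in lista_num:
--         string += str(i)
--
--     return string
-- ===== SOURCE B (Python) =====
-- def char_to_num(string):
--     out = ""
--     for c in string.lower():
--         o = ord(c)
--         if 97 <= o <= 122:
--             out += str(o - 87)
--         elif o == 32:
--             out += "36"
--     return out
-- ===== Notes on version B (the rewrite author's own statement) =====
-- stated objective: simpler
-- what changed: B drops the 27-entry dict with its inner first-match scan and A's two extra passes (int list, then string rebuild) in favour of a single pass over the lowered string computing each code in closed form from ord(c) and appending it directly.
import Mathlib
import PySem

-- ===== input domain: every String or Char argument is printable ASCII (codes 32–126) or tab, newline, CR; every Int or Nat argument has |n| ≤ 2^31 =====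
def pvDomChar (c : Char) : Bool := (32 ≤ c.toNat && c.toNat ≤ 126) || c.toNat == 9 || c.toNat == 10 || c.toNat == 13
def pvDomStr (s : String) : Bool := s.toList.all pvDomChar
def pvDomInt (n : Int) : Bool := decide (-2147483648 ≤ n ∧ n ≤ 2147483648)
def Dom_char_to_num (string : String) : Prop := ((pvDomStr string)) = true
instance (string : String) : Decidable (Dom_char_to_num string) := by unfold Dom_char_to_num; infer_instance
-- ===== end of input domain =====

-- B replaces A's 27-entry dict with its inner first-match scan and A's two extra passes
-- (int list, then string rebuild) by one pass with closed-form arithmetic on ord(c); objective: simpler.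


-- ===== PORT A =====
-- the module-level dict, in insertion order
def pvDict : List (Char × Int) :=
  [('a',10),('b',11),('c',12),('d',13),('e',14),('f',15),
   ('g',16),('h',17),('i',18),('j',19),('k',20),('l',21),
   ('m',22),('n',23),('o',24),('p',25),('q',26),
   ('r',27),('s',28),('t',29),('u',30),('v',31),('w',32),('x',33),('y',34),('z',35),(' ',36)]

-- inner 'for i in dict: if char==i: lista_num.append(dict[i]); break'
def pvScan (c : Char) : List (Char × Int) → Option Int
  | [] => none
  | (k, v) :: rest => if c = k then some v else pvScan c rest

def char_to_num (string : String) : String :=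
  let cs := PySem.Chars.lower string.toList        -- string = string.lower()
  let lista_num : List Int := cs.foldl (fun acc c =>
    match pvScan c pvDict with
    | some v => acc ++ [v]
    | none => acc) []
  String.ofList (lista_num.foldl (fun s i => s ++ PySem.Int.toChars i) [])  -- string += str(i)

-- ===== PORT B =====
def char_to_num_alt (string : String) : String :=
  String.ofList ((PySem.Chars.lower string.toList).foldl (fun out c =>
    let o : Int := (c.toNat : Int)                 -- o = ord(c)
    if 97 ≤ o ∧ o ≤ 122 then out ++ PySem.Int.toChars (o - 87)
    else if o = 32 then out ++ ['3','6']           -- "36"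
    else out) [])

-- ===== PRECONDITION & SPEC =====
def Spec_char_to_num (string : String) (out : String) : Prop := out = char_to_num_alt string
instance (string : String) (out : String) : Decidable (Spec_char_to_num string out) := by unfold Spec_char_to_num; infer_instance

-- ===== CLAIM (what is proved, stated in full; the proofs are below) =====
def Claim_equal_char_to_num : Prop := ∀ (string : String), Dom_char_to_num string → Spec_char_to_num string (char_to_num string)

-- ===== LEMMAS AND PROOFS =====
theorem char_eq_iff_toNat (c d : Char) : c = d ↔ c.toNat = d.toNat := by
  constructor
  · rintro rfl; rfl
  · intro h; exact Char.ofNat_toNat c ▸ Char.ofNat_toNat d ▸ congrArg Char.ofNat h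

-- the dict scan is closed-form arithmetic on the character code
theorem pvScan_eq_none (c : Char) (kvs : List (Char × Int)) (h : ∀ p ∈ kvs, c ≠ p.1) :
    pvScan c kvs = none := by
  induction kvs with
  | nil => rfl
  | cons p rest ih =>
    obtain ⟨k, v⟩ := p
    simp only [pvScan, if_neg (h (k,v) (List.mem_cons_self))]
    exact ih fun q hq => h q (List.mem_cons_of_mem _ hq)
set_option maxHeartbeats 1000000 in
theorem pvScan_eq (c : Char) :
    pvScan c pvDict =
      (if 97 ≤ (c.toNat : Int) ∧ (c.toNat : Int) ≤ 122 then some ((c.toNat : Int) - 87)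
       else if (c.toNat : Int) = 32 then some 36 else none) := by
  by_cases h1 : c = 'a'
  · subst h1; decide
  by_cases h2 : c = 'b'
  · subst h2; decide
  by_cases h3 : c = 'c'
  · subst h3; decide
  by_cases h4 : c = 'd'
  · subst h4; decide
  by_cases h5 : c = 'e'
  · subst h5; decide
  by_cases h6 : c = 'f'
  · subst h6; decide
  by_cases h7 : c = 'g'
  · subst h7; decide
  by_cases h8 : c = 'h'
  · subst h8; decide
  by_cases h9 : c = 'i'
  · subst h9; decide
  by_cases h10 : c = 'j'
  · subst h10; decide
  by_cases h11 : c = 'k'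
  · subst h11; decide
  by_cases h12 : c = 'l'
  · subst h12; decide
  by_cases h13 : c = 'm'
  · subst h13; decide
  by_cases h14 : c = 'n'
  · subst h14; decide
  by_cases h15 : c = 'o'
  · subst h15; decide
  by_cases h16 : c = 'p'
  · subst h16; decide
  by_cases h17 : c = 'q'
  · subst h17; decide
  by_cases h18 : c = 'r'
  · subst h18; decide
  by_cases h19 : c = 's'
  · subst h19; decide
  by_cases h20 : c = 't'
  · subst h20; decide
  by_cases h21 : c = 'u'
  · subst h21; decide
  by_cases h22 : c = 'v'
  · subst h22; decide
  by_cases h23 : c = 'w'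
  · subst h23; decide
  by_cases h24 : c = 'x'
  · subst h24; decide
  by_cases h25 : c = 'y'
  · subst h25; decide
  by_cases h26 : c = 'z'
  · subst h26; decide
  by_cases h27 : c = ' '
  · subst h27; decide
  have h97 : ¬ (97 ≤ (c.toNat : Int) ∧ (c.toNat : Int) ≤ 122) := by
    rintro ⟨hl, hr⟩
    obtain ⟨n, hn⟩ : ∃ n, c.toNat = n := ⟨_, rfl⟩
    rw [hn] at hl hr
    have hl' : 97 ≤ n := by exact_mod_cast hl
    have hr' : n ≤ 122 := by exact_mod_cast hr
    interval_cases n <;> simp_all [char_eq_iff_toNat, Char.reduceToNat]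
  have h32 : ¬ ((c.toNat : Int) = 32) := by
    intro h
    exact h27 ((char_eq_iff_toNat c ' ').mpr (by exact_mod_cast h))
  rw [if_neg h97, if_neg h32]
  apply pvScan_eq_none
  intro p hp
  simp only [pvDict, List.mem_cons, List.not_mem_nil, or_false] at hp
  rcases hp with rfl|rfl|rfl|rfl|rfl|rfl|rfl|rfl|rfl|rfl|rfl|rfl|rfl|rfl|rfl|rfl|rfl|rfl|rfl|rfl|rfl|rfl|rfl|rfl|rfl|rfl|rfl <;> assumption

-- B's per-character contribution equals A's contribution run through str(·)
theorem step_eq (c : Char) :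
    (if 97 ≤ (c.toNat : Int) ∧ (c.toNat : Int) ≤ 122 then PySem.Int.toChars ((c.toNat : Int) - 87)
     else if (c.toNat : Int) = 32 then ['3','6'] else []) =
    (pvScan c pvDict).toList.flatMap PySem.Int.toChars := by
  rw [pvScan_eq]
  split_ifs with h1 h2
  · simp
  · simp only [Option.toList_some, List.flatMap_cons, List.flatMap_nil, List.append_nil]
    decide
  · simp

theorem foldl_app (g : Char → List Char) (cs : List Char) (init : List Char) :
    cs.foldl (fun out c => out ++ g c) init = init ++ cs.flatMap g := by
  induction cs generalizing init with
  | nil => simp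
  | cons c cs ih => simp [List.foldl_cons, ih]

theorem foldl_app_int (g : Char → List Int) (cs : List Char) (init : List Int) :
    cs.foldl (fun out c => out ++ g c) init = init ++ cs.flatMap g := by
  induction cs generalizing init with
  | nil => simp
  | cons c cs ih => simp [List.foldl_cons, ih]

theorem foldl_app_iToC (xs : List Int) (init : List Char) :
    xs.foldl (fun s i => s ++ PySem.Int.toChars i) init = init ++ xs.flatMap PySem.Int.toChars := by
  induction xs generalizing init with
  | nil => simp
  | cons x xs ih => simp [List.foldl_cons, ih]

-- ===== VERDICT (by name: the statement is the Claim_ definition above) =====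
theorem char_to_num_spec : Claim_equal_char_to_num := by
  intro s _
  unfold Spec_char_to_num char_to_num char_to_num_alt
  dsimp only
  have hA : ∀ cs : List Char,
      cs.foldl (fun acc c => match pvScan c pvDict with
        | some v => acc ++ [v]
        | none => acc) ([] : List Int)
      = cs.flatMap (fun c => (pvScan c pvDict).toList) := by
    intro cs
    have : (fun (acc : List Int) (c : Char) => match pvScan c pvDict with
        | some v => acc ++ [v]
        | none => acc)
        = fun acc c => acc ++ (pvScan c pvDict).toList := by
      funext acc c; cases pvScan c pvDict <;> simp
    rw [this, foldl_app_int]; simp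
  rw [hA, foldl_app_iToC]
  have hB : (fun (out : List Char) (c : Char) =>
      let o : Int := (c.toNat : Int)
      if 97 ≤ o ∧ o ≤ 122 then out ++ PySem.Int.toChars (o - 87)
      else if o = 32 then out ++ ['3','6']
      else out)
      = fun out c => out ++ (pvScan c pvDict).toList.flatMap PySem.Int.toChars := by
    funext out c
    rw [← step_eq c]
    simp only []
    split_ifs <;> simp
  rw [hB, foldl_app]
  simp [List.flatMap_assoc]
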